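-- pv_equiv track=rewrite | github.com/denis-trtnr/ner-quality-impact | src/noise/utils.py | protect_token
-- ===== SOURCE A (Python) =====
-- def is_punct(tok: str) -> bool:
--     return all(not c.isalnum() for c in tok)
--
-- def protect_token(tok: str) -> bool:
--     if len(tok) <= 3:
--         return True
--     if any(c.isdigit() for c in tok):
--         return True
--     if is_punct(tok):
--         return True
--     return False
-- ===== SOURCE B (Python) =====
-- def protect_token(tok: str) -> bool:
--     has_digit = False
--     has_alpha = False
--     for c in tok:
--         if c.isdigit():
--             has_digit = True
--         if c.isalpha():
--             has_alpha = True
--     return len(tok) <= 3 or has_digit or not has_alpha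
-- ===== Notes on version B (the rewrite author's own statement) =====
-- stated objective: alternative
-- what changed: Replaces A's two separate scans (any-digit, then all-non-alnum via is_punct) and early-return chain with a single accumulating pass that sets has_digit/has_alpha flags, returning via the simplified boolean identity len<=3 or has_digit or not has_alpha.
import Mathlib
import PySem

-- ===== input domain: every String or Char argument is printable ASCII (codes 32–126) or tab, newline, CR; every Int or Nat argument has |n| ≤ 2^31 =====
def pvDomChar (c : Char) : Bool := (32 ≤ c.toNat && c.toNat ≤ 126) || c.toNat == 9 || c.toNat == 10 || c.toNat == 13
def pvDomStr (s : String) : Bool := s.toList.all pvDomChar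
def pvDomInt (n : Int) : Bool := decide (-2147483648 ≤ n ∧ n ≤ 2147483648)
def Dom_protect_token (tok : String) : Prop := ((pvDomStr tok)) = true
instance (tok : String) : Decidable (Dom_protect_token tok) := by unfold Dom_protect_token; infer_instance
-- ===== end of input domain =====

-- B folds A's two comprehension scans (any-digit, all-non-alnum) into one flag-accumulating
-- pass and returns via the simplified condition len<=3 or has_digit or not has_alpha.


-- ===== PORT A =====
def is_punct (tok : String) : Bool :=
  tok.toList.all (fun c => !(PySem.Chars.isalnum c))

def protect_token (tok : String) : Bool :=
  if PySem.Str.len tok ≤ 3 then true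
  else if tok.toList.any (fun c => PySem.Chars.isdigit c) then true
  else if is_punct tok then true
  else false

-- ===== PORT B =====
-- one pass over the characters accumulating the two flags, exactly as Source B's for-loop
def protect_token_alt (tok : String) : Bool :=
  let flags := tok.toList.foldl
    (fun (st : Bool × Bool) c =>
      (if PySem.Chars.isdigit c then true else st.1,
       if PySem.Chars.isalpha c then true else st.2))
    (false, false)
  decide (PySem.Str.len tok ≤ 3) || flags.1 || !flags.2

-- ===== PRECONDITION & SPEC =====
def Spec_protect_token (tok : String) (out : Bool) : Prop := out = protect_token_alt tok
instance (tok : String) (out : Bool) : Decidable (Spec_protect_token tok out) := by unfold Spec_protect_token; infer_instance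

-- ===== CLAIM (what is proved, stated in full; the proofs are below) =====
def Claim_equal_protect_token : Prop := ∀ (tok : String), Dom_protect_token tok → Spec_protect_token tok (protect_token tok)

-- ===== LEMMAS AND PROOFS =====
theorem pv_foldl_flags (l : List Char) (d a : Bool) :
    l.foldl
      (fun (st : Bool × Bool) c =>
        (if PySem.Chars.isdigit c then true else st.1,
         if PySem.Chars.isalpha c then true else st.2))
      (d, a)
    = (d || l.any (fun c => PySem.Chars.isdigit c),
       a || l.any (fun c => PySem.Chars.isalpha c)) := by
  induction l generalizing d a with
  | nil => simp
  | cons c t ih =>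
      simp only [List.foldl_cons, List.any_cons, ih]
      cases PySem.Chars.isdigit c <;> cases PySem.Chars.isalpha c <;> simp

theorem pv_all_not_alnum (l : List Char) :
    l.all (fun c => !(PySem.Chars.isalnum c))
    = (!(l.any (fun c => PySem.Chars.isdigit c)) && !(l.any (fun c => PySem.Chars.isalpha c))) := by
  induction l with
  | nil => simp
  | cons c t ih =>
      simp only [List.all_cons, List.any_cons]
      rw [ih]
      cases hd : PySem.Chars.isdigit c <;> cases ha : PySem.Chars.isalpha c <;>
        simp [PySem.Chars.isalnum, hd, ha]

-- ===== VERDICT (by name: the statement is the Claim_ definition above) =====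
theorem protect_token_spec : Claim_equal_protect_token := by
  intro tok _
  unfold Spec_protect_token protect_token protect_token_alt is_punct
  simp only [pv_foldl_flags, pv_all_not_alnum, Bool.false_or]
  by_cases h : PySem.Str.len tok ≤ 3
  · rw [if_pos h, decide_eq_true h]
    simp
  · rw [if_neg h, decide_eq_false h, Bool.false_or]
    cases hd : tok.toList.any (fun c => PySem.Chars.isdigit c) <;>
      cases ha : tok.toList.any (fun c => PySem.Chars.isalpha c) <;>
        simp
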